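-- pv_equiv track=rewrite | github.com/pypi-data/pypi-mirror-360 | packages/vibe_farm/vibe_farm-0.1.4-py3-none-any.whl/vibe_farm/dependencies.py | dependency_names
-- ===== SOURCE A (Python) =====
-- from typing import Iterable
--
-- def dependency_names(dependencies: Iterable[str]) -> set[str]:
--     """Extract package names from dependency strings."""
--     names: set[str] = set()
--     for dep in dependencies:
--         name = dep.split(";")[0]
--         for sep in ["==", ">=", "<=", ">", "<"]:
--             name = name.split(sep)[0]
--         name = name.split("[")[0].strip()
--         if name:
--             names.add(name)
--     return names
-- ===== SOURCE B (Python) =====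
-- def dependency_names(dependencies):
--     """Extract package names from dependency strings."""
--     names = set()
--     for dep in dependencies:
--         prefix = []
--         for i, c in enumerate(dep):
--             if c in ';><[' or (c == '=' and dep[i + 1:i + 2] == '='):
--                 break
--             prefix.append(c)
--         name = ''.join(prefix).strip()
--         if name:
--             names.add(name)
--     return names
-- ===== Notes on version B (the rewrite author's own statement) =====
-- stated objective: simpler
-- what changed: Replaces A's chain of seven successive str.split prefix-takings with a single character scan that stops at the first delimiter (';', '>', '<', '[' or '=='), taking the prefix in one pass.
import Mathlib
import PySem

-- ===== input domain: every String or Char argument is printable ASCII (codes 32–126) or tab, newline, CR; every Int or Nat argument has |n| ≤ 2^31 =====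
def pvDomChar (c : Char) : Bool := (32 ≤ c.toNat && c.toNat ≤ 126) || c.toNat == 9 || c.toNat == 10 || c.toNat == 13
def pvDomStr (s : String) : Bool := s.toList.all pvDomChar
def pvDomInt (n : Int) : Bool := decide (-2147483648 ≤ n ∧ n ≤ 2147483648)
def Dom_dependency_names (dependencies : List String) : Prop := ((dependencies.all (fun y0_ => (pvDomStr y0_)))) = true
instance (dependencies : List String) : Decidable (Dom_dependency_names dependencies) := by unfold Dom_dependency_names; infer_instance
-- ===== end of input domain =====

-- B replaces A's chain of seven successive split-and-take-prefix passes by a single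
-- character scan that cuts at the first delimiter (simpler: one pass per string).

-- ===== PORT A =====
-- dep.split(sep)[0]: split with a non-empty sep never returns an empty list, so [0] is .headD []
def depNameA (dep : String) : List Char :=
  let name := (PySem.Chars.splitOn dep.toList [';']).headD []
  let name := [['=', '='], ['>', '='], ['<', '='], ['>'], ['<']].foldl
      (fun n sep => (PySem.Chars.splitOn n sep).headD []) name
  PySem.Chars.strip ((PySem.Chars.splitOn name ['[']).headD [])

def dependency_names (dependencies : List String) : List String :=
  dependencies.foldl
    (fun names dep =>
      let name := depNameA dep
      if name.isEmpty then names else PySem.Set.add names (String.ofList name))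
    []

-- ===== PORT B =====
-- the scan of Source B: stop at the first ';' '>' '<' '[' or at '=' followed by '='
def scanPrefixB : List Char → List Char
  | [] => []
  | c :: rest =>
    if c = ';' ∨ c = '>' ∨ c = '<' ∨ c = '[' ∨ (c = '=' ∧ rest.head? = some '=') then []
    else c :: scanPrefixB rest

def depNameB (dep : String) : List Char :=
  PySem.Chars.strip (scanPrefixB dep.toList)

def dependency_names_alt (dependencies : List String) : List String :=
  dependencies.foldl
    (fun names dep =>
      let name := depNameB dep
      if name.isEmpty then names else PySem.Set.add names (String.ofList name))
    []

-- ===== PRECONDITION & SPEC =====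
def Spec_dependency_names (dependencies : List String) (out : List String) : Prop := out = dependency_names_alt dependencies
instance (dependencies : List String) (out : List String) : Decidable (Spec_dependency_names dependencies out) := by unfold Spec_dependency_names; infer_instance

-- ===== CLAIM (what is proved, stated in full; the proofs are below) =====
def Claim_equal_dependency_names : Prop := ∀ (dependencies : List String), Dom_dependency_names dependencies → Spec_dependency_names dependencies (dependency_names dependencies)

-- ===== LEMMAS AND PROOFS =====

-- the prefix of s before the first occurrence of sep (what one split-and-take-[0] computes)
def pvCutAt (sep : List Char) : List Char → List Char
  | [] => []
  | c :: rest => if sep.isPrefixOf (c :: rest) then [] else c :: pvCutAt sep rest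

theorem go_spec (sep : List Char) (hsep : sep ≠ []) :
    ∀ (fuel : Nat) (l cur : List Char) (acc : List (List Char)), l.length < fuel →
    ∃ tail, PySem.Chars.splitOn.go sep fuel l cur acc
      = acc.reverse ++ (cur.reverse ++ pvCutAt sep l) :: tail := by
  intro fuel
  induction fuel with
  | zero => intro l cur acc h; omega
  | succ fuel ih =>
    intro l cur acc h
    cases l with
    | nil =>
      refine ⟨[], ?_⟩
      simp [PySem.Chars.splitOn.go, pvCutAt]
    | cons c rest =>
      have hseplen : 1 ≤ sep.length := by
        cases sep with
        | nil => simp at hsep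
        | cons a tl => simp
      by_cases hp : sep.isPrefixOf (c :: rest)
      · have hlen : (List.drop sep.length (c :: rest)).length < fuel := by
          simp only [List.length_drop, List.length_cons] at *
          omega
        obtain ⟨tail, ht⟩ := ih (List.drop sep.length (c :: rest)) [] (cur.reverse :: acc) hlen
        refine ⟨pvCutAt sep (List.drop sep.length (c :: rest)) :: tail, ?_⟩
        rw [PySem.Chars.splitOn.go, if_pos hp, ht]
        simp [pvCutAt, hp]
      · have hlen : rest.length < fuel := by
          simp only [List.length_cons] at h; omega
        obtain ⟨tail, ht⟩ := ih rest (c :: cur) acc hlen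
        refine ⟨tail, ?_⟩
        rw [PySem.Chars.splitOn.go, if_neg hp, ht]
        simp [pvCutAt, hp]

theorem splitOn_headD (s sep : List Char) (hsep : sep ≠ []) :
    (PySem.Chars.splitOn s sep).headD [] = pvCutAt sep s := by
  obtain ⟨tail, ht⟩ := go_spec sep hsep (s.length + 1) s [] [] (by omega)
  rw [PySem.Chars.splitOn, ht]
  simp

theorem pass1 {d c : Char} (h : c ≠ d) (z : List Char) :
    pvCutAt [d] (c :: z) = c :: pvCutAt [d] z := by
  simp [pvCutAt, List.isPrefixOf, Ne.symm h]

theorem pass2 {d e c : Char} (h : c ≠ d) (z : List Char) :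
    pvCutAt [d, e] (c :: z) = c :: pvCutAt [d, e] z := by
  cases z with
  | nil => simp [pvCutAt, List.isPrefixOf]
  | cons b bs => simp [pvCutAt, List.isPrefixOf, Ne.symm h]

theorem pass2' {d e c : Char} {z : List Char} (h : z.head? ≠ some e) :
    pvCutAt [d, e] (c :: z) = c :: pvCutAt [d, e] z := by
  cases z with
  | nil => simp [pvCutAt, List.isPrefixOf]
  | cons b bs =>
    have hb : b ≠ e := by intro he; exact h (by simp [he])
    simp [pvCutAt, List.isPrefixOf, Ne.symm hb]

theorem kill1 {c : Char} {z : List Char} (h : z.head? = some c) : pvCutAt [c] z = [] := by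
  cases z with
  | nil => simp at h
  | cons b bs =>
    have : b = c := by simpa using h
    simp [pvCutAt, List.isPrefixOf, this]

theorem cut_head (sep : List Char) (z : List Char) :
    (pvCutAt sep z).head? = none ∨ (pvCutAt sep z).head? = z.head? := by
  cases z with
  | nil => right; rfl
  | cons c rest =>
    by_cases hp : sep.isPrefixOf (c :: rest)
    · left; simp [pvCutAt, hp]
    · right; simp [pvCutAt, hp]

theorem head_step {sep : List Char} {z : List Char} {c : Char}
    (h : z.head? = none ∨ z.head? = some c) :
    (pvCutAt sep z).head? = none ∨ (pvCutAt sep z).head? = some c := by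
  rcases cut_head sep z with h' | h'
  · left; exact h'
  · rcases h with h | h
    · left; rw [h', h]
    · right; rw [h', h]

theorem chain_eq (s : List Char) :
    pvCutAt ['['] (pvCutAt ['<'] (pvCutAt ['>'] (pvCutAt ['<', '='] (pvCutAt ['>', '=']
      (pvCutAt ['=', '='] (pvCutAt [';'] s)))))) = scanPrefixB s := by
  induction s with
  | nil => rfl
  | cons c rest ih =>
    by_cases h1 : c = ';'
    · subst h1
      rw [kill1 (c := ';') (z := ';' :: rest) rfl]
      simp [scanPrefixB, pvCutAt]
    · by_cases h2 : c = '>'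
      · subst h2
        have h0 : (('>' :: rest) : List Char).head? = none ∨ (('>' :: rest) : List Char).head? = some '>' := Or.inr rfl
        have h4 := head_step (sep := ['<', '=']) (head_step (sep := ['>', '=']) (head_step (sep := ['=', '=']) (head_step (sep := [';']) h0)))
        rcases h4 with h4 | h4
        · rw [List.head?_eq_none_iff.mp h4]
          simp [scanPrefixB, pvCutAt]
        · rw [kill1 h4]
          simp [scanPrefixB, pvCutAt]
      · by_cases h3 : c = '<'
        · subst h3
          have h0 : (('<' :: rest) : List Char).head? = none ∨ (('<' :: rest) : List Char).head? = some '<' := Or.inr rfl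
          have h5 := head_step (sep := ['>']) (head_step (sep := ['<', '=']) (head_step (sep := ['>', '=']) (head_step (sep := ['=', '=']) (head_step (sep := [';']) h0))))
          rcases h5 with h5 | h5
          · rw [List.head?_eq_none_iff.mp h5]
            simp [scanPrefixB, pvCutAt]
          · rw [kill1 h5]
            simp [scanPrefixB, pvCutAt]
        · by_cases h4 : c = '['
          · subst h4
            have h0 : (('[' :: rest) : List Char).head? = none ∨ (('[' :: rest) : List Char).head? = some '[' := Or.inr rfl
            have h6 := head_step (sep := ['<']) (head_step (sep := ['>']) (head_step (sep := ['<', '=']) (head_step (sep := ['>', '=']) (head_step (sep := ['=', '=']) (head_step (sep := [';']) h0)))))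
            rcases h6 with h6 | h6
            · rw [List.head?_eq_none_iff.mp h6]
              simp [scanPrefixB, pvCutAt]
            · rw [kill1 h6]
              simp [scanPrefixB]
          · by_cases h5 : c = '='
            · subst h5
              by_cases hr : rest.head? = some '='
              · obtain ⟨r2, hrest⟩ : ∃ r2, rest = '=' :: r2 := by
                  cases rest with
                  | nil => simp at hr
                  | cons b bs => exact ⟨bs, by simpa using congrArg (fun o => (o.getD ' ') :: bs) hr⟩
                subst hrest
                rw [pass1 (by decide), pass1 (by decide)]
                have : pvCutAt ['=', '='] ('=' :: '=' :: pvCutAt [';'] r2) = [] := by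
                  simp [pvCutAt, List.isPrefixOf]
                rw [this]
                simp [scanPrefixB, pvCutAt, hr]
              · rw [pass1 (by decide)]
                have hy : (pvCutAt [';'] rest).head? ≠ some '=' := by
                  rcases cut_head [';'] rest with h' | h'
                  · rw [h']; simp
                  · rw [h']; exact hr
                rw [pass2' hy, pass2 (by decide), pass2 (by decide),
                    pass1 (by decide), pass1 (by decide), pass1 (by decide), ih]
                simp [scanPrefixB, hr]
            · -- ordinary character: every split passes it through
              rw [pass1 h1, pass2 h5, pass2 h2, pass2 h3,
                  pass1 h2, pass1 h3, pass1 h4, ih]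
              simp [scanPrefixB, h1, h2, h3, h4, h5]

theorem depName_eq (dep : String) : depNameA dep = depNameB dep := by
  unfold depNameA depNameB
  simp only [List.foldl]
  rw [splitOn_headD _ _ (by decide), splitOn_headD _ _ (by decide),
      splitOn_headD _ _ (by decide), splitOn_headD _ _ (by decide),
      splitOn_headD _ _ (by decide), splitOn_headD _ _ (by decide),
      splitOn_headD _ _ (by decide), chain_eq]

-- ===== VERDICT (by name: the statement is the Claim_ definition above) =====
theorem dependency_names_spec : Claim_equal_dependency_names := by
  intro deps _
  unfold Spec_dependency_names dependency_names dependency_names_alt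
  have h : (fun (names : List String) (dep : String) =>
        let name := depNameA dep
        if name.isEmpty then names else PySem.Set.add names (String.ofList name))
      = (fun (names : List String) (dep : String) =>
        let name := depNameB dep
        if name.isEmpty then names else PySem.Set.add names (String.ofList name)) := by
    funext names dep
    simp only [depName_eq]
  rw [h]
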